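-- pv_equiv track=rewrite | github.com/Jintao-Huang/leetcode_notebook | 0 competition/单/119/4 奇偶跳[975].py | next_ge_min
-- ===== SOURCE A (Python) =====
-- from typing import List
--
-- def next_ge_min(nums: List[int]) -> List[int]:
--     arg = sorted(range(len(nums)), key=lambda i: nums[i])
--     ans = [-1] * len(arg)
--     st = []
--     for lo in reversed(range(len(arg))):
--         x = arg[lo]
--         while len(st) > 0 and x >= arg[st[-1]]:  # 队列内无相等元素.
--             st.pop()
--         if len(st) > 0:
--             ans[x] = arg[st[-1]]  # ans[hi] = nums[st[-1]]  # st可存数字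
--         st.append(lo)
--     return ans
-- ===== SOURCE B (Python) =====
-- from typing import List
--
-- def next_ge_min(nums: List[int]) -> List[int]:
--     # simpler: direct scan — for each i take the (value, index)-lexicographic
--     # minimum among later elements whose value is >= nums[i]; -1 if none.
--     n = len(nums)
--     ans = []
--     for i in range(n):
--         best = -1
--         for j in range(i + 1, n):
--             if nums[j] >= nums[i] and (best == -1 or (nums[j], j) < (nums[best], best)):
--                 best = j
--         ans.append(best)
--     return ans
-- ===== Notes on version B (the rewrite author's own statement) =====
-- stated objective: simpler
-- what changed: A's argsort plus reverse monotonic-stack pass is replaced by a direct nested scan that, for each index i, picks the (value, index)-lexicographic minimum among the later elements with value >= nums[i].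
import Mathlib
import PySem

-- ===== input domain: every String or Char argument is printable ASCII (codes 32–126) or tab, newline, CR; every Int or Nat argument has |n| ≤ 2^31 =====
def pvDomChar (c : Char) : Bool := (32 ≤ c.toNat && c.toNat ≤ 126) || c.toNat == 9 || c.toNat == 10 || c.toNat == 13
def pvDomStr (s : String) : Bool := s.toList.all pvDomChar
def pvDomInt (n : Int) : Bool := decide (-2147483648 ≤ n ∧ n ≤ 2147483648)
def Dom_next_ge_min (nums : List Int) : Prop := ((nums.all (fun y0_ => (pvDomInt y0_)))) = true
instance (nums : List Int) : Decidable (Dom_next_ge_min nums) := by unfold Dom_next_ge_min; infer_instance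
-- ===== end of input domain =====

-- B replaces A's sort + monotonic stack by a direct nested scan for the
-- (value, index)-lexicographic minimum among later not-smaller elements (objective: simpler).

-- ===== PORT A =====
-- arg[p]; every index used by A is in range, so the default is never taken
def pvAv (arg : List Int) (p : Int) : Int := PySem.List.pyGetD arg p 0

-- the Python stack (append/pop at the right end) is represented head-as-top
def pvPopA (arg : List Int) (x : Int) : List Int → List Int
  | [] => []
  | t :: st => if x ≥ pvAv arg t then pvPopA arg x st else t :: st

def pvStepA (arg : List Int) (s : List Int × List Int) (lo : Int) : List Int × List Int :=
  let x := pvAv arg lo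
  let st := pvPopA arg x s.2
  let ans := match st with
    | [] => s.1
    | t :: _ => PySem.List.pySetD s.1 x (pvAv arg t)
  (ans, lo :: st)

def next_ge_min (nums : List Int) : List Int :=
  let arg := PySem.List.sorted (PySem.List.pyRange 0 (nums.length : Int) 1)
      (fun i => PySem.List.pyGetD nums i 0) false
  let ans := PySem.List.pyRepeat [(-1 : Int)] (arg.length : Int)
  ((PySem.List.pyRange 0 (arg.length : Int) 1).reverse.foldl (pvStepA arg) (ans, [])).1

-- ===== PORT B =====
-- nums[j]; every index used by B is in range, so the default is never taken
def pvKey (nums : List Int) (j : Int) : Int := PySem.List.pyGetD nums j 0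

-- the Python tuple comparison (nums[j], j) < (nums[best], best) is ported as the
-- explicit lexicographic disjunction
def pvBestB (nums : List Int) (i : Int) : Int :=
  (PySem.List.pyRange (i + 1) (nums.length : Int) 1).foldl
    (fun best j =>
      if pvKey nums j ≥ pvKey nums i ∧
          (best = -1 ∨ pvKey nums j < pvKey nums best ∨
            (pvKey nums j = pvKey nums best ∧ j < best))
      then j else best) (-1)

def next_ge_min_alt (nums : List Int) : List Int :=
  (PySem.List.pyRange 0 (nums.length : Int) 1).foldl
    (fun ans i => ans ++ [pvBestB nums i]) []

-- ===== PRECONDITION & SPEC =====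
def Spec_next_ge_min (nums : List Int) (out : List Int) : Prop := out = next_ge_min_alt nums
instance (nums : List Int) (out : List Int) : Decidable (Spec_next_ge_min nums out) := by unfold Spec_next_ge_min; infer_instance

-- ===== CLAIM (what is proved, stated in full; the proofs are below) =====
def Claim_equal_next_ge_min : Prop := ∀ (nums : List Int), Dom_next_ge_min nums → Spec_next_ge_min nums (next_ge_min nums)

-- ===== LEMMAS AND PROOFS =====

-- lexicographic order on (value, index)
def pvLex (nums : List Int) (a b : Int) : Prop :=
  pvKey nums a < pvKey nums b ∨ (pvKey nums a = pvKey nums b ∧ a < b)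

-- "b is the answer for index i when only candidates j < m are considered"
def pvBSpecM (nums : List Int) (m i b : Int) : Prop :=
  (b = -1 ∧ ∀ j, i < j → j < m → ¬ pvKey nums i ≤ pvKey nums j)
  ∨ (i < b ∧ b < m ∧ pvKey nums i ≤ pvKey nums b ∧
      ∀ j, i < j → j < m → pvKey nums i ≤ pvKey nums j →
        (pvKey nums b < pvKey nums j ∨ (pvKey nums b = pvKey nums j ∧ b ≤ j)))

-- prefix-maximum test: arg[q] < arg[p] for all q in [lo, p)
def pvPM (arg : List Int) (lo p : Int) : Bool :=
  (PySem.List.pyRange lo p 1).all (fun q => decide (pvAv arg q < pvAv arg p))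

-- the stack contents after the suffix [lo, n) has been processed
def pvStk (arg : List Int) (n lo : Int) : List Int :=
  (PySem.List.pyRange lo n 1).filter (pvPM arg lo)

-- the value A writes into ans at index arg[p]
def pvG (arg : List Int) (n p : Int) : Int :=
  match (PySem.List.pyRange (p + 1) n 1).find? (fun q => decide (pvAv arg p < pvAv arg q)) with
  | some q => pvAv arg q
  | none => -1

theorem pvBSpecM_unique (nums : List Int) (m i b1 b2 : Int)
    (h1 : pvBSpecM nums m i b1) (h2 : pvBSpecM nums m i b2) : b1 = b2 := by
  rcases h1 with ⟨e1, n1⟩ | ⟨l1, u1, c1, m1⟩ <;> rcases h2 with ⟨e2, n2⟩ | ⟨l2, u2, c2, m2⟩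
  · omega
  · exact absurd c2 (n1 b2 l2 u2)
  · exact absurd c1 (n2 b1 l1 u1)
  · have := m1 b2 l2 u2 c2
    have := m2 b1 l1 u1 c1
    omega

theorem pvBestB_aux (nums : List Int) (i : Int) (h0 : 0 ≤ i) (k : Nat) :
    pvBSpecM nums (i + 1 + k) i
      ((PySem.List.pyRange (i + 1) (i + 1 + k) 1).foldl
        (fun best j =>
          if pvKey nums j ≥ pvKey nums i ∧
              (best = -1 ∨ pvKey nums j < pvKey nums best ∨
                (pvKey nums j = pvKey nums best ∧ j < best))
          then j else best) (-1)) := by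
  induction k with
  | zero =>
      rw [show (i + 1 + (0:Nat) : Int) = i + 1 by push_cast; ring,
        PySem.List.pyRange_one_eq_nil (by omega)]
      left
      exact ⟨rfl, by intro j h1 h2; omega⟩
  | succ k ih =>
      have hsplit : PySem.List.pyRange (i + 1) (i + 1 + (k + 1 : Nat)) 1
          = PySem.List.pyRange (i + 1) (i + 1 + k) 1 ++ [i + 1 + k] := by
        rw [show (i + 1 + ((k : Nat) + 1 : Nat) : Int) = (i + 1 + k) + 1 by push_cast; ring]
        exact PySem.List.pyRange_one_succ_right (by omega)
      rw [hsplit, List.foldl_append, List.foldl_cons, List.foldl_nil]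
      set m : Int := i + 1 + k with hm
      set b := (PySem.List.pyRange (i + 1) m 1).foldl
        (fun best j =>
          if pvKey nums j ≥ pvKey nums i ∧
              (best = -1 ∨ pvKey nums j < pvKey nums best ∨
                (pvKey nums j = pvKey nums best ∧ j < best))
          then j else best) (-1) with hb
      have hm1 : (i + 1 + ((k : Nat) + 1 : Nat) : Int) = m + 1 := by push_cast; omega
      rw [hm1]
      split_ifs with hc
      · -- new best is m
        right
        have hcand := hc.1
        refine ⟨by omega, by omega, hcand, ?_⟩
        intro j hj1 hj2 hjc
        rcases ih with ⟨e1, n1⟩ | ⟨l1, u1, c1, m1⟩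
        · -- previously no candidate: j must be m
          have : j = m := by
            by_contra hne
            exact n1 j hj1 (by omega) hjc
          subst this; right; exact ⟨rfl, le_refl _⟩
        · -- previous best b; condition gives key m < key b
          have hklt : pvKey nums m < pvKey nums b := by
            rcases hc.2 with h | h | h
            · omega
            · exact h
            · omega
          by_cases hjm : j = m
          · subst hjm; right; exact ⟨rfl, le_refl _⟩
          · have := m1 j hj1 (by omega) hjc
            omega
      · -- best unchanged
        rcases ih with ⟨e1, n1⟩ | ⟨l1, u1, c1, m1⟩
        · left
          refine ⟨e1, ?_⟩
          intro j hj1 hj2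
          by_cases hjm : j = m
          · subst hjm
            intro hcand
            exact hc ⟨hcand, Or.inl e1⟩
          · exact n1 j hj1 (by omega)
        · right
          refine ⟨l1, by omega, c1, ?_⟩
          intro j hj1 hj2 hjc
          by_cases hjm : j = m
          · have hble : ¬ (pvKey nums m < pvKey nums b ∨ (pvKey nums m = pvKey nums b ∧ m < b)) := by
              intro h
              exact hc ⟨by rw [← hjm] at *; exact hjc, Or.inr h⟩
            rw [hjm]
            omega
          · exact m1 j hj1 (by omega) hjc

theorem pvBestB_spec (nums : List Int) (i : Int) (h0 : 0 ≤ i) (h1 : i < (nums.length : Int)) :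
    pvBSpecM nums (nums.length : Int) i (pvBestB nums i) := by
  have hk : (i + 1 + (((nums.length : Int) - (i + 1)).toNat : Int)) = (nums.length : Int) := by omega
  have := pvBestB_aux nums i h0 ((nums.length : Int) - (i + 1)).toNat
  rw [hk] at this
  exact this

theorem find?_pyRange_fuel (p : Int → Bool) (b : Int) :
    ∀ (k : Nat) (a : Int), b - a ≤ k → ∀ x,
      ((PySem.List.pyRange a b 1).find? p = some x ↔
        (a ≤ x ∧ x < b ∧ p x = true ∧ ∀ y, a ≤ y → y < x → ¬ p y = true)) := by
  intro k
  induction k with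
  | zero =>
      intro a ha x
      rw [PySem.List.pyRange_one_eq_nil (by omega)]
      simp only [List.find?_nil]
      constructor
      · intro h; cases h
      · intro ⟨h1, h2, _, _⟩; omega
  | succ k ih =>
      intro a ha x
      by_cases hab : b ≤ a
      · rw [PySem.List.pyRange_one_eq_nil hab]
        simp only [List.find?_nil]
        constructor
        · intro h; cases h
        · intro ⟨h1, h2, _, _⟩; omega
      · rw [PySem.List.pyRange_one_cons (by omega), List.find?_cons]
        by_cases hpa : p a = true
        · simp only [hpa]
          constructor
          · rintro ⟨rfl⟩
            exact ⟨le_refl _, by omega, hpa, by intro y h1 h2; omega⟩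
          · rintro ⟨h1, h2, hx, hmin⟩
            rcases lt_or_eq_of_le h1 with h' | h'
            · exact absurd hpa (hmin a (le_refl _) h')
            · rw [h']
          -- x = a
        · simp only [hpa]
          rw [ih (a + 1) (by omega) x]
          constructor
          · rintro ⟨h1, h2, hx, hmin⟩
            refine ⟨by omega, h2, hx, ?_⟩
            intro y hy1 hy2
            rcases lt_or_eq_of_le hy1 with h' | h'
            · exact hmin y (by omega) hy2
            · rw [← h']; simpa using hpa
          · rintro ⟨h1, h2, hx, hmin⟩
            have hxa : x ≠ a := by rintro rfl; exact hpa hx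
            exact ⟨by omega, h2, hx, fun y hy1 hy2 => hmin y (by omega) hy2⟩

theorem find?_pyRange_some (p : Int → Bool) (a b x : Int) :
    (PySem.List.pyRange a b 1).find? p = some x ↔
      (a ≤ x ∧ x < b ∧ p x = true ∧ ∀ y, a ≤ y → y < x → ¬ p y = true) :=
  find?_pyRange_fuel p b (b - a).toNat a (by omega) x

theorem find?_pyRange_none (p : Int → Bool) (a b : Int) :
    (PySem.List.pyRange a b 1).find? p = none ↔ ∀ y, a ≤ y → y < b → ¬ p y = true := by
  rw [List.find?_eq_none]
  constructor
  · intro h y h1 h2; exact h y (PySem.List.mem_pyRange_one.2 ⟨h1, h2⟩)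
  · intro h y hy
    have := PySem.List.mem_pyRange_one.1 hy
    exact h y this.1 this.2

-- bundled facts about arg
theorem arg_facts (nums arg : List Int)
    (hperm : arg.Perm (PySem.List.pyRange 0 (nums.length : Int) 1)) :
    arg.length = nums.length ∧ arg.Nodup ∧
      (∀ x, x ∈ arg ↔ 0 ≤ x ∧ x < (nums.length : Int)) := by
  refine ⟨?_, ?_, ?_⟩
  · rw [hperm.length_eq, PySem.List.length_pyRange_one]; omega
  · exact hperm.nodup_iff.2 (PySem.List.nodup_pyRange_one _ _)
  · intro x
    rw [hperm.mem_iff, PySem.List.mem_pyRange_one]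

theorem pvAv_getElem (arg : List Int) (q : Int) (h0 : 0 ≤ q) (h1 : q < (arg.length : Int)) :
    pvAv arg q = arg[q.toNat]'(by omega) := by
  unfold pvAv
  exact PySem.List.pyGetD_eq_getElem arg 0 h0 h1

theorem pvG_spec (nums arg : List Int)
    (hperm : arg.Perm (PySem.List.pyRange 0 (nums.length : Int) 1))
    (hpw : arg.Pairwise (pvLex nums)) (p : Nat) (hp : p < arg.length) :
    pvBSpecM nums (nums.length : Int) (arg[p]) (pvG arg (nums.length : Int) (p : Int)) := by
  obtain ⟨hlen, hnd, hmem⟩ := arg_facts nums arg hperm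
  have hpwg := List.pairwise_iff_getElem.1 hpw
  have havp : pvAv arg (p : Int) = arg[p] := by
    rw [pvAv_getElem arg p (by omega) (by exact_mod_cast hp)]
    simp
  have hbounds : ∀ (t : Nat) (ht : t < arg.length), 0 ≤ arg[t] ∧ arg[t] < (nums.length : Int) :=
    fun t ht => (hmem _).1 (List.getElem_mem ht)
  -- positions: every j in range is some arg[t]
  have hpos : ∀ j : Int, 0 ≤ j → j < (nums.length : Int) →
      ∃ (t : Nat) (ht : t < arg.length), arg[t] = j := by
    intro j h1 h2
    have : j ∈ arg := (hmem j).2 ⟨h1, h2⟩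
    exact List.mem_iff_getElem.1 this
  -- order along arg vs candidacy
  have hforward : ∀ (t : Nat) (ht : t < arg.length), arg[p] < arg[t] →
      pvKey nums (arg[p]) ≤ pvKey nums (arg[t]) → (p : Int) < t := by
    intro t ht hgt hcand
    rcases lt_trichotomy (p : Nat) t with h | h | h
    · exact_mod_cast h
    · subst h; omega
    · have := hpwg t p ht hp h
      unfold pvLex at this
      omega
  unfold pvG
  cases hfind : (PySem.List.pyRange ((p : Int) + 1) (nums.length : Int) 1).find?
      (fun q => decide (pvAv arg (p : Int) < pvAv arg q)) with
  | none =>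
      rw [find?_pyRange_none] at hfind
      left
      refine ⟨rfl, ?_⟩
      intro j hj1 hj2 hcand
      obtain ⟨t, ht, rfl⟩ := hpos j (by have := hbounds p hp; omega) hj2
      have htn : (t : Int) < (nums.length : Int) := by rw [← hlen]; exact_mod_cast ht
      have htgt : (p : Int) < t := hforward t ht (by omega) hcand
      have := hfind t (by omega) htn
      rw [havp, pvAv_getElem arg t (by omega) (by exact_mod_cast ht)] at this
      simp only [Int.toNat_natCast, decide_eq_true_eq] at this
      omega
  | some q =>
      rw [find?_pyRange_some] at hfind
      obtain ⟨hq1, hq2, hqp, hqmin⟩ := hfind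
      rw [havp] at hqp hqmin
      have hq0 : 0 ≤ q := by omega
      have hqlen : q < (arg.length : Int) := by omega
      have havq : pvAv arg q = arg[q.toNat]'(by omega) := pvAv_getElem arg q hq0 hqlen
      simp only [decide_eq_true_eq] at hqp
      show pvBSpecM nums (nums.length : Int) (arg[p]) (pvAv arg q)
      rw [havq] at hqp ⊢
      right
      have hqn : q.toNat < arg.length := by omega
      have hplt : (p : Nat) < q.toNat := by omega
      have hlexpq := hpwg p q.toNat hp hqn hplt
      refine ⟨hqp, (hbounds q.toNat hqn).2, ?_, ?_⟩
      · unfold pvLex at hlexpq; omega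
      · intro j hj1 hj2 hcand
        obtain ⟨t, ht, rfl⟩ := hpos j (by have := hbounds p hp; omega) hj2
        have htn : (t : Int) < (nums.length : Int) := by rw [← hlen]; exact_mod_cast ht
        have htgt : (p : Int) < t := hforward t ht (by omega) hcand
        -- t is in the searched range and satisfies the predicate, so q ≤ t
        have hqt : q ≤ (t : Int) := by
          by_contra hlt
          have := hqmin t (by omega) (by omega)
          rw [pvAv_getElem arg t (by omega) (by exact_mod_cast ht)] at this
          simp only [Int.toNat_natCast, decide_eq_true_eq] at this
          omega
        rcases lt_or_eq_of_le hqt with h' | h'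
        · have := hpwg q.toNat t hqn ht (by omega)
          unfold pvLex at this
          omega
        · have : q.toNat = t := by omega
          subst this
          right
          exact ⟨rfl, le_refl _⟩

theorem insertBy_pairwise (nums : List Int) (x : Int) (acc : List Int)
    (hpw : acc.Pairwise (pvLex nums)) (hlt : ∀ a ∈ acc, a < x) :
    (PySem.List.insertBy (fun a b => decide (pvKey nums a < pvKey nums b)) x acc).Pairwise
      (pvLex nums) := by
  induction acc with
  | nil => simp [PySem.List.insertBy]
  | cons y ys ih =>
      rw [List.pairwise_cons] at hpw
      simp only [PySem.List.insertBy]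
      split_ifs with h
      · simp only [decide_eq_true_eq] at h
        refine List.pairwise_cons.2 ⟨?_, List.pairwise_cons.2 hpw⟩
        intro z hz
        rcases List.mem_cons.mp hz with rfl | hz
        · exact Or.inl h
        · have := hpw.1 z hz
          unfold pvLex at *
          omega
      · simp only [decide_eq_true_eq, not_lt] at h
        refine List.pairwise_cons.2 ⟨?_, ih hpw.2 (fun a ha => hlt a (List.mem_cons_of_mem _ ha))⟩
        intro z hz
        rw [PySem.List.mem_insertBy] at hz
        rcases hz with rfl | hz
        · rcases lt_or_eq_of_le h with h' | h'
          · exact Or.inl h'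
          · exact Or.inr ⟨h', hlt y (List.mem_cons_self)⟩
        · exact hpw.1 z hz

theorem sorted_pairwise_pvLex (nums : List Int) :
    (PySem.List.sorted (PySem.List.pyRange 0 (nums.length : Int) 1)
      (fun i => PySem.List.pyGetD nums i 0) false).Pairwise (pvLex nums) := by
  rw [PySem.List.sorted_eq_foldl_insertBy]
  have main : ∀ (l : List Int) (acc : List Int), l.Pairwise (· < ·) →
      acc.Pairwise (pvLex nums) → (∀ a ∈ acc, ∀ b ∈ l, a < b) →
      (l.foldl (fun acc x =>
        PySem.List.insertBy (fun a b => decide (pvKey nums a < pvKey nums b)) x acc) acc).Pairwise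
        (pvLex nums) := by
    intro l
    induction l with
    | nil => intro acc _ h _; simpa using h
    | cons x xs ih =>
        intro acc hl hacc hcross
        rw [List.pairwise_cons] at hl
        rw [List.foldl_cons]
        refine ih _ hl.2
          (insertBy_pairwise nums x acc hacc (fun a ha => hcross a ha x List.mem_cons_self)) ?_
        intro a ha b hb
        rw [PySem.List.mem_insertBy] at ha
        rcases ha with rfl | ha
        · exact hl.1 b hb
        · exact hcross a ha b (List.mem_cons_of_mem _ hb)
  have h1 : (PySem.List.pyRange 0 (nums.length : Int) 1).Pairwise (· < ·) :=
    PySem.List.pairwise_lt_pyRange_one _ _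
  have := main (PySem.List.pyRange 0 (nums.length : Int) 1) [] h1 (List.Pairwise.nil) (by simp)
  simpa [pvKey] using this

-- pvPM unfolded
theorem pvPM_iff (arg : List Int) (lo p : Int) :
    pvPM arg lo p = true ↔ ∀ q, lo ≤ q → q < p → pvAv arg q < pvAv arg p := by
  unfold pvPM
  rw [List.all_eq_true]
  constructor
  · intro h q h1 h2
    simpa using h q (PySem.List.mem_pyRange_one.2 ⟨h1, h2⟩)
  · intro h q hq
    have := PySem.List.mem_pyRange_one.1 hq
    simpa using h q this.1 this.2

-- stack values increase with position
theorem stk_pairwise (arg : List Int) (n lo : Int) :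
    (pvStk arg n lo).Pairwise (fun a b => pvAv arg a < pvAv arg b) := by
  unfold pvStk
  rw [List.pairwise_filter]
  refine (PySem.List.pairwise_lt_pyRange_one lo n).imp_of_mem ?_
  intro a b ha hb hab hpa hpb
  have hla := (PySem.List.mem_pyRange_one.1 ha).1
  exact (pvPM_iff arg lo b).1 hpb a hla hab

-- popping from a value-increasing stack is filtering
theorem pvPopA_filter (arg : List Int) (x : Int) (l : List Int)
    (hl : l.Pairwise (fun a b => pvAv arg a < pvAv arg b)) :
    pvPopA arg x l = l.filter (fun t => decide (x < pvAv arg t)) := by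
  induction l with
  | nil => rfl
  | cons h t ih =>
      rw [List.pairwise_cons] at hl
      by_cases hx : x ≥ pvAv arg h
      · rw [pvPopA, if_pos hx, List.filter_cons_of_neg (by simpa using (by omega : ¬ x < pvAv arg h))]
        exact ih hl.2
      · rw [pvPopA, if_neg hx, List.filter_cons_of_pos (by simpa using (by omega : x < pvAv arg h)),
          List.filter_eq_self.2]
        intro a ha
        have := hl.1 a ha
        simp only [decide_eq_true_eq]
        omega

-- splitting off the head of the stack
theorem stk_cons (arg : List Int) (n lo : Int) (h : lo < n) :
    pvStk arg n lo
      = lo :: (pvStk arg n (lo + 1)).filter (fun t => decide (pvAv arg lo < pvAv arg t)) := by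
  unfold pvStk
  rw [List.filter_filter, PySem.List.pyRange_one_cons h, List.filter_cons_of_pos
    (by rw [pvPM_iff]; intro q h1 h2; omega)]
  congr 1
  apply List.filter_congr
  intro t ht
  have hlt := (PySem.List.mem_pyRange_one.1 ht).1
  rw [Bool.eq_iff_iff, Bool.and_eq_true, pvPM_iff, pvPM_iff]
  constructor
  · intro hpm
    exact ⟨by simpa using hpm lo (le_refl _) (by omega), fun q h1 h2 => hpm q (by omega) h2⟩
  · rintro ⟨hlo, hpm⟩
    simp only [decide_eq_true_eq] at hlo
    intro q h1 h2
    rcases lt_or_eq_of_le h1 with h' | h'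
    · exact hpm q (by omega) h2
    · rw [← h']; exact hlo

-- the head of the popped stack is the first later position with a greater value
theorem stk_head (arg : List Int) (n lo : Int) (h : lo < n) :
    ((pvStk arg n (lo + 1)).filter (fun t => decide (pvAv arg lo < pvAv arg t))).head?
      = (PySem.List.pyRange (lo + 1) n 1).find? (fun q => decide (pvAv arg lo < pvAv arg q)) := by
  have : (pvStk arg n (lo + 1)).filter (fun t => decide (pvAv arg lo < pvAv arg t))
      = (pvStk arg n lo).tail := by rw [stk_cons arg n lo h]; rfl
  rw [this]
  unfold pvStk
  rw [PySem.List.pyRange_one_cons h, List.filter_cons_of_pos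
    (by rw [pvPM_iff]; intro q h1 h2; omega)]
  show ((PySem.List.pyRange (lo + 1) n 1).filter (pvPM arg lo)).head? = _
  rw [List.head?_filter]
  cases hf : (PySem.List.pyRange (lo + 1) n 1).find? (fun q => decide (pvAv arg lo < pvAv arg q)) with
  | none =>
      rw [find?_pyRange_none] at hf
      rw [find?_pyRange_none]
      intro y h1 h2 hpm
      have := (pvPM_iff arg lo y).1 hpm lo (le_refl _) (by omega)
      exact hf y h1 h2 (by simpa using this)
  | some q0 =>
      rw [find?_pyRange_some] at hf
      obtain ⟨h1, h2, h3, h4⟩ := hf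
      simp only [decide_eq_true_eq] at h3
      rw [find?_pyRange_some]
      refine ⟨h1, h2, ?_, ?_⟩
      · rw [pvPM_iff]
        intro r hr1 hr2
        rcases lt_or_eq_of_le hr1 with h' | h'
        · have := h4 r (by omega) hr2
          simp only [decide_eq_true_eq] at this
          omega
        · rw [← h']; exact h3
      · intro y hy1 hy2 hpm
        have := (pvPM_iff arg lo y).1 hpm lo (le_refl _) (by omega)
        exact h4 y hy1 hy2 (by simpa using this)

theorem loopA_inv (nums arg : List Int)
    (hperm : arg.Perm (PySem.List.pyRange 0 (nums.length : Int) 1)) (k : Nat)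
    (hk : k ≤ nums.length) :
    (((PySem.List.pyRange ((nums.length : Int) - k) (nums.length : Int) 1).reverse.foldl
        (pvStepA arg) (PySem.List.pyRepeat [(-1 : Int)] (arg.length : Int), []))).2
      = pvStk arg (nums.length : Int) ((nums.length : Int) - k) ∧
    (((PySem.List.pyRange ((nums.length : Int) - k) (nums.length : Int) 1).reverse.foldl
        (pvStepA arg) (PySem.List.pyRepeat [(-1 : Int)] (arg.length : Int), []))).1.length
      = nums.length ∧
    ∀ (p : Int), 0 ≤ p → p < (nums.length : Int) →
      PySem.List.pyGetD (((PySem.List.pyRange ((nums.length : Int) - k) (nums.length : Int) 1).reverse.foldl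
        (pvStepA arg) (PySem.List.pyRepeat [(-1 : Int)] (arg.length : Int), []))).1 (pvAv arg p) 0
        = if (nums.length : Int) - k ≤ p then pvG arg (nums.length : Int) p else -1 := by
  obtain ⟨hlen, hnd, hmem⟩ := arg_facts nums arg hperm
  have hbnd : ∀ (p : Int), 0 ≤ p → p < (nums.length : Int) →
      0 ≤ pvAv arg p ∧ pvAv arg p < (nums.length : Int) := by
    intro p h0 h1
    have hp' : p < (arg.length : Int) := by omega
    rw [pvAv_getElem arg p h0 hp']
    exact (hmem _).1 (List.getElem_mem _)
  have hinj : ∀ (p q : Int), 0 ≤ p → p < (nums.length : Int) → 0 ≤ q → q < (nums.length : Int) →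
      pvAv arg p = pvAv arg q → p = q := by
    intro p q hp0 hp1 hq0 hq1 he
    rw [pvAv_getElem arg p hp0 (by omega), pvAv_getElem arg q hq0 (by omega)] at he
    have := (List.Nodup.getElem_inj_iff hnd).1 he
    omega
  induction k with
  | zero =>
      rw [show ((nums.length : Int) - (0 : Nat)) = (nums.length : Int) by simp]
      rw [PySem.List.pyRange_one_eq_nil (le_refl _)]
      refine ⟨?_, ?_, ?_⟩
      · unfold pvStk
        rw [PySem.List.pyRange_one_eq_nil (le_refl _)]
        rfl
      · rw [PySem.List.pyRepeat_singleton]; simp [hlen]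
      · intro p h0 h1
        rw [if_neg (by omega)]
        rw [PySem.List.pyRepeat_singleton]
        simp only [List.reverse_nil, List.foldl_nil]
        rw [PySem.List.pyGetD_eq_getElem _ _ (hbnd p h0 h1).1
          (by have := hbnd p h0 h1; simp only [List.length_replicate, Int.toNat_natCast]; omega)]
        simp
  | succ k ih =>
      have hlo0 : (0 : Int) ≤ (nums.length : Int) - (k + 1 : Nat) := by push_cast; omega
      have hlon : (nums.length : Int) - (k + 1 : Nat) < (nums.length : Int) := by push_cast; omega
      set lo : Int := (nums.length : Int) - (k + 1 : Nat) with hlodef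
      have hlo1 : (nums.length : Int) - (k : Nat) = lo + 1 := by omega
      obtain ⟨ihst, ihlen, ihans⟩ := ih (by omega)
      rw [hlo1] at ihst ihlen ihans
      rw [PySem.List.pyRange_one_cons hlon, List.reverse_cons, List.foldl_append, List.foldl_cons,
        List.foldl_nil]
      set s' := ((PySem.List.pyRange (lo + 1) (nums.length : Int) 1).reverse.foldl
        (pvStepA arg) (PySem.List.pyRepeat [(-1 : Int)] (arg.length : Int), [])) with hs'
      show (pvStepA arg s' lo).2 = _ ∧ (pvStepA arg s' lo).1.length = _ ∧ _
      have hpop : pvPopA arg (pvAv arg lo) s'.2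
          = (pvStk arg (nums.length : Int) (lo + 1)).filter
              (fun t => decide (pvAv arg lo < pvAv arg t)) := by
        rw [ihst]
        exact pvPopA_filter arg _ _ (stk_pairwise arg _ _)
      have hhead := stk_head arg (nums.length : Int) lo hlon
      have hstep : pvStepA arg s' lo
          = (match (pvStk arg (nums.length : Int) (lo + 1)).filter
                (fun t => decide (pvAv arg lo < pvAv arg t)) with
             | [] => s'.1
             | t :: _ => PySem.List.pySetD s'.1 (pvAv arg lo) (pvAv arg t),
             lo :: (pvStk arg (nums.length : Int) (lo + 1)).filter
                (fun t => decide (pvAv arg lo < pvAv arg t))) := by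
        unfold pvStepA
        dsimp only
        rw [hpop]
      rw [hstep]
      refine ⟨by rw [stk_cons arg _ lo hlon], ?_, ?_⟩
      · cases hF : (pvStk arg (nums.length : Int) (lo + 1)).filter
            (fun t => decide (pvAv arg lo < pvAv arg t)) with
        | nil => exact ihlen
        | cons t0 rest => rw [PySem.List.length_pySetD]; exact ihlen
      · intro p h0 h1
        cases hF : (pvStk arg (nums.length : Int) (lo + 1)).filter
            (fun t => decide (pvAv arg lo < pvAv arg t)) with
        | nil =>
            simp only
            rw [ihans p h0 h1]
            by_cases hplo : p = lo
            · subst hplo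
              rw [if_neg (by omega), if_pos (by omega)]
              rw [hF] at hhead
              unfold pvG
              rw [← hhead]
              rfl
            · by_cases hge : lo + 1 ≤ p
              · rw [if_pos hge, if_pos (by omega)]
              · rw [if_neg hge, if_neg (by omega)]
        | cons t0 rest =>
            simp only
            rw [hF] at hhead
            have hfind : (PySem.List.pyRange (lo + 1) (nums.length : Int) 1).find?
                (fun q => decide (pvAv arg lo < pvAv arg q)) = some t0 := hhead.symm
            have hx := hbnd lo hlo0 hlon
            have hp := hbnd p h0 h1
            have hxcast : pvAv arg lo = (((pvAv arg lo).toNat : Nat) : Int) := by omega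
            have hpcast : pvAv arg p = (((pvAv arg p).toNat : Nat) : Int) := by omega
            rw [hpcast, hxcast, PySem.List.pyGetD_pySetD_natCast _ _ _ _ _
              (by rw [ihlen]; omega)]
            by_cases hplo : p = lo
            · subst hplo
              rw [if_pos rfl, if_pos (by omega)]
              unfold pvG
              rw [hfind]
            · rw [if_neg (by intro hcon; exact hplo (hinj p lo h0 h1 hlo0 hlon (by omega)))]
              rw [← hpcast, ihans p h0 h1]
              by_cases hge : lo + 1 ≤ p
              · rw [if_pos hge, if_pos (by omega)]
              · rw [if_neg hge, if_neg (by omega)]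

-- ===== VERDICT (by name: the statement is the Claim_ definition above) =====
theorem next_ge_min_spec : Claim_equal_next_ge_min := by
  intro nums _dom
  unfold Spec_next_ge_min next_ge_min next_ge_min_alt
  dsimp only
  set arg := PySem.List.sorted (PySem.List.pyRange 0 (nums.length : Int) 1)
    (fun i => PySem.List.pyGetD nums i 0) false with harg
  have hperm : arg.Perm (PySem.List.pyRange 0 (nums.length : Int) 1) :=
    PySem.List.sorted_perm _ _ _
  have hpw : arg.Pairwise (pvLex nums) := sorted_pairwise_pvLex nums
  obtain ⟨hlen, hnd, hmem⟩ := arg_facts nums arg hperm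
  have hlenI : (arg.length : Int) = (nums.length : Int) := by exact_mod_cast hlen
  rw [hlenI]
  have hinv := loopA_inv nums arg hperm nums.length (le_refl _)
  rw [show ((nums.length : Int) - (nums.length : Nat)) = 0 by omega] at hinv
  obtain ⟨_, hanslen, hans⟩ := hinv
  rw [hlenI] at hanslen hans
  rw [PySem.List.foldl_append_singleton_eq_map, List.nil_append]
  apply List.ext_getElem
  · rw [hanslen, List.length_map, PySem.List.length_pyRange_one]
    omega
  · intro m hm1 hm2
    rw [hanslen] at hm1
    have hmn : (m : Int) < (nums.length : Int) := by exact_mod_cast hm1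
    -- right-hand side: B's value at index m
    have hrhs : ((PySem.List.pyRange 0 (nums.length : Int) 1).map (pvBestB nums))[m]'hm2
        = pvBestB nums (m : Int) := by
      rw [List.getElem_map, PySem.List.getElem_pyRange_one]
      simp
    rw [hrhs]
    -- left-hand side: the position t of m in arg
    have hmem' : ((m : Nat) : Int) ∈ arg := (hmem _).2 ⟨by omega, hmn⟩
    obtain ⟨t, ht, hteq⟩ := List.mem_iff_getElem.1 hmem'
    have htI : ((t : Nat) : Int) < (nums.length : Int) := by
      have : t < nums.length := by omega
      exact_mod_cast this
    have havt : pvAv arg (t : Int) = arg[t] := by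
      rw [pvAv_getElem arg (t : Int) (by omega) (by exact_mod_cast ht)]
      simp
    have hlhs := hans (t : Int) (by omega) htI
    rw [if_pos (by omega), havt, hteq] at hlhs
    have hget : PySem.List.pyGetD ((List.foldl (pvStepA arg)
          (PySem.List.pyRepeat [(-1 : Int)] (nums.length : Int), [])
          (PySem.List.pyRange 0 (nums.length : Int) 1).reverse)).1 ((m : Nat) : Int) 0
        = ((List.foldl (pvStepA arg)
          (PySem.List.pyRepeat [(-1 : Int)] (nums.length : Int), [])
          (PySem.List.pyRange 0 (nums.length : Int) 1).reverse)).1[m]'(by rw [hanslen]; exact hm1) := by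
      rw [PySem.List.pyGetD_eq_getElem _ _ (by omega) (by rw [hanslen]; exact_mod_cast hm1)]
      simp
    rw [hget] at hlhs
    rw [hlhs]
    -- both sides satisfy the unique specification
    have hA := pvG_spec nums arg hperm hpw t ht
    rw [hteq] at hA
    have hB := pvBestB_spec nums (m : Int) (by omega) hmn
    exact pvBSpecM_unique nums _ _ _ _ hA hB
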